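-- pv_equiv track=rewrite | github.com/HarisaranS/Sn1p3rNetX | core/parser.py | smart_os_detection
-- ===== SOURCE A (Python) =====
-- def smart_os_detection(host_info):
--     guesses = []
--     fallback = None
--     for match in host_info.get('osmatch', []):
--         name = match.get('name', 'Unknown')
--         accuracy = int(match.get('accuracy', 0))
--         if accuracy >= 90:
--             guesses.append(f"{name} (Acc: {accuracy}%)")
--         elif not fallback:
--             fallback = f"{name} (Acc: {accuracy}%)"
--     if not guesses and fallback:
--         guesses.append(fallback)
--     return "\n".join(guesses[:2]) if guesses else "OS Detection Uncertain"
-- ===== SOURCE B (Python) =====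
-- def smart_os_detection(host_info):
--     matches = host_info.get('osmatch', [])
--     strong = [f"{m.get('name', 'Unknown')} (Acc: {int(m.get('accuracy', 0))}%)"
--               for m in matches if int(m.get('accuracy', 0)) >= 90]
--     if strong:
--         return "\n".join(strong[:2])
--     weak = next((f"{m.get('name', 'Unknown')} (Acc: {int(m.get('accuracy', 0))}%)"
--                  for m in matches if int(m.get('accuracy', 0)) < 90), None)
--     return weak if weak is not None else "OS Detection Uncertain"
-- ===== Notes on version B (the rewrite author's own statement) =====
-- stated objective: simpler
-- what changed: Replaces A's single loop threading a guesses list and a mutable fallback variable with two independent scans: a comprehension collecting the strong (>=90) guesses, and only if that is empty a lazy next() for the first sub-90 match, dropping the interleaved 'not fallback' state.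
import Mathlib
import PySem

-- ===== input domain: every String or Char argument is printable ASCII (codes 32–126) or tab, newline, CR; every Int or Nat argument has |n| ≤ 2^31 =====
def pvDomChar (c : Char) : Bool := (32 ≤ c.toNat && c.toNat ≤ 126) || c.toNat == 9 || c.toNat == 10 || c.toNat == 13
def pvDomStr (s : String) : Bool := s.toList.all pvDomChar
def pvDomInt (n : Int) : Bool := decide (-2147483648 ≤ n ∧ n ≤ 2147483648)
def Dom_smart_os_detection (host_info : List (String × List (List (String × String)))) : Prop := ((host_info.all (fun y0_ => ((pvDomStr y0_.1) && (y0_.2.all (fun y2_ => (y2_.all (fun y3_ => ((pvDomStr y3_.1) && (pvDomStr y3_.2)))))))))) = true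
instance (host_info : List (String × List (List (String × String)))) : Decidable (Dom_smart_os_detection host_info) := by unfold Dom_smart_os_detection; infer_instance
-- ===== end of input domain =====

-- B replaces A's single loop threading a guesses list plus a mutable fallback with two
-- independent scans (a comprehension for the >=90 guesses, a lazy first-match scan for the
-- fallback); objective: simpler.

-- shared dict-lookup helper: first match in an association list (Python dict.get)
def pvLookup? {α : Type} (d : List (String × α)) (k : String) : Option α :=
  (d.find? (fun p => p.1 == k)).map (·.2)

-- host_info.get('osmatch', [])
def pvMatches (host_info : List (String × List (List (String × String)))) :
    List (List (String × String)) :=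
  (pvLookup? host_info "osmatch").getD []

-- int(match.get('accuracy', 0)); none = ValueError of int()
def pvAcc? (m : List (String × String)) : Option Int :=
  match pvLookup? m "accuracy" with
  | none => some 0
  | some v => PySem.Int.ofStr? v

-- f"{name} (Acc: {accuracy}%)"
def pvFmt (name : String) (acc : Int) : String :=
  name ++ " (Acc: " ++ PySem.Int.toStr acc ++ "%)"

-- Python truthiness test 'not fallback' on an Optional[str]
def pvFalsy (o : Option String) : Bool :=
  match o with
  | none => true
  | some s => s == ""

-- ===== PORT A =====
-- the loop body; state = some (guesses, fallback), none = a ValueError was raised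
def pvStepA (st : Option (List String × Option String)) (m : List (String × String)) :
    Option (List String × Option String) :=
  match st with
  | none => none
  | some (guesses, fallback) =>
    let name := (pvLookup? m "name").getD "Unknown"
    match pvAcc? m with
    | none => none
    | some accuracy =>
      if accuracy ≥ 90 then some (guesses ++ [pvFmt name accuracy], fallback)
      else if pvFalsy fallback then some (guesses, some (pvFmt name accuracy))
      else some (guesses, fallback)

def smart_os_detection (host_info : List (String × List (List (String × String)))) : String :=
  match (pvMatches host_info).foldl pvStepA (some ([], none)) with
  | none => ""  -- unreachable under Pre_: Python raises ValueError here
  | some (guesses, fallback) =>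
    let guesses := if guesses.isEmpty && !pvFalsy fallback then guesses ++ [fallback.getD ""] else guesses
    if guesses.isEmpty then "OS Detection Uncertain" else PySem.Str.join "\n" (guesses.take 2)

-- ===== PORT B =====
-- the strong-guess comprehension; none = ValueError of int()
def pvStrongB : List (List (String × String)) → Option (List String)
  | [] => some []
  | m :: rest =>
    match pvAcc? m with
    | none => none
    | some acc =>
      match pvStrongB rest with
      | none => none
      | some l => some (if acc ≥ 90 then pvFmt ((pvLookup? m "name").getD "Unknown") acc :: l else l)

-- next((... for m in matches if int(...) < 90), None); outer none = ValueError
def pvWeakB : List (List (String × String)) → Option (Option String)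
  | [] => some none
  | m :: rest =>
    match pvAcc? m with
    | none => none
    | some acc =>
      if acc < 90 then some (some (pvFmt ((pvLookup? m "name").getD "Unknown") acc))
      else pvWeakB rest

def smart_os_detection_alt (host_info : List (String × List (List (String × String)))) : String :=
  let ms := pvMatches host_info
  match pvStrongB ms with
  | none => ""  -- unreachable under Pre_: Python raises ValueError here
  | some strong =>
    if !strong.isEmpty then PySem.Str.join "\n" (strong.take 2)
    else
      match pvWeakB ms with
      | none => ""  -- unreachable under Pre_
      | some (some weak) => weak
      | some none => "OS Detection Uncertain"

-- ===== PRECONDITION & SPEC =====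
-- Pre_ excludes exactly the inputs where int(match['accuracy']) raises ValueError
-- (a non-integer 'accuracy' string in some osmatch entry); there A raises, B raises too.
def Pre_smart_os_detection (host_info : List (String × List (List (String × String)))) : Prop :=
  ((pvMatches host_info).all (fun m => (pvAcc? m).isSome)) = true

instance (host_info : List (String × List (List (String × String)))) : Decidable (Pre_smart_os_detection host_info) := by
  unfold Pre_smart_os_detection; infer_instance

def pvWitness_smart_os_detection : (List (String × List (List (String × String)))) :=
  [("osmatch", [[("name", "Linux"), ("accuracy", "95")], [("name", "Windows"), ("accuracy", "80")]])]

def Spec_smart_os_detection (host_info : List (String × List (List (String × String)))) (out : String) : Prop := out = smart_os_detection_alt host_info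
instance (host_info : List (String × List (List (String × String)))) (out : String) : Decidable (Spec_smart_os_detection host_info out) := by unfold Spec_smart_os_detection; infer_instance

-- ===== CLAIM (what is proved, stated in full; the proofs are below) =====
def Claim_equal_smart_os_detection : Prop := ∀ (host_info : List (String × List (List (String × String)))), Dom_smart_os_detection host_info → Pre_smart_os_detection host_info → Spec_smart_os_detection host_info (smart_os_detection host_info)

-- ===== LEMMAS AND PROOFS =====

-- pvFmt never yields the empty string
lemma pvFmt_ne_empty (n : String) (a : Int) : (pvFmt n a == "") = false := by
  simp only [beq_eq_false_iff_ne, ne_eq]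
  intro h
  have hl := congrArg String.length h
  simp [pvFmt, String.length_append] at hl

lemma pvStrongB_some (ms : List (List (String × String)))
    (h : (ms.all (fun m => (pvAcc? m).isSome)) = true) : ∃ l, pvStrongB ms = some l := by
  induction ms with
  | nil => exact ⟨[], rfl⟩
  | cons m rest ih =>
    simp only [List.all_cons, Bool.and_eq_true] at h
    obtain ⟨acc, hacc⟩ := Option.isSome_iff_exists.mp h.1
    obtain ⟨l, hl⟩ := ih h.2
    exact ⟨if acc ≥ 90 then pvFmt ((pvLookup? m "name").getD "Unknown") acc :: l else l,
      by simp [pvStrongB, hacc, hl]⟩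

lemma pvWeakB_some (ms : List (List (String × String)))
    (h : (ms.all (fun m => (pvAcc? m).isSome)) = true) : ∃ w, pvWeakB ms = some w := by
  induction ms with
  | nil => exact ⟨none, rfl⟩
  | cons m rest ih =>
    simp only [List.all_cons, Bool.and_eq_true] at h
    obtain ⟨acc, hacc⟩ := Option.isSome_iff_exists.mp h.1
    obtain ⟨w, hw⟩ := ih h.2
    by_cases hlt : acc < 90
    · exact ⟨some (pvFmt ((pvLookup? m "name").getD "Unknown") acc), by simp [pvWeakB, hacc, hlt]⟩
    · exact ⟨w, by simp [pvWeakB, hacc, hlt, hw]⟩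

lemma pvFalsy_fmt (n : String) (a : Int) : pvFalsy (some (pvFmt n a)) = false := by
  simp [pvFalsy, pvFmt_ne_empty]

-- loop invariant: A's fold, on a fully parseable list, equals the strong list appended
-- to the incoming guesses together with the updated fallback
lemma foldA_eq (ms : List (List (String × String)))
    (h : (ms.all (fun m => (pvAcc? m).isSome)) = true)
    (g : List String) (fb : Option String) :
    ms.foldl pvStepA (some (g, fb)) =
      some (g ++ (pvStrongB ms).getD [],
            if pvFalsy fb then
              (match (pvWeakB ms).getD none with
               | some s => some s
               | none => fb)
            else fb) := by
  induction ms generalizing g fb with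
  | nil => simp [pvStrongB, pvWeakB]
  | cons m rest ih =>
    simp only [List.all_cons, Bool.and_eq_true] at h
    obtain ⟨hm, hrest⟩ := h
    obtain ⟨acc, hacc⟩ := Option.isSome_iff_exists.mp hm
    obtain ⟨ls, hls⟩ := pvStrongB_some rest hrest
    obtain ⟨w, hw⟩ := pvWeakB_some rest hrest
    by_cases hge : acc ≥ 90
    · have hlt : ¬ acc < 90 := by omega
      simp [List.foldl_cons, pvStepA, pvStrongB, pvWeakB, hacc, hge, hlt, hls, hw, ih hrest]
    · have hlt : acc < 90 := by omega
      by_cases hfb : pvFalsy fb = true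
      · simp [List.foldl_cons, pvStepA, pvStrongB, pvWeakB, hacc, hge, hlt, hls, hfb,
              ih hrest, pvFalsy_fmt]
      · simp [List.foldl_cons, pvStepA, pvStrongB, hacc, hge, hls, hfb, ih hrest]

-- ===== VERDICT (by name: the statement is the Claim_ definition above) =====
lemma pvWeakB_nonempty (ms : List (List (String × String))) (s : String)
    (h : pvWeakB ms = some (some s)) : (s == "") = false := by
  induction ms with
  | nil => simp [pvWeakB] at h
  | cons m rest ih =>
    unfold pvWeakB at h
    cases hacc : pvAcc? m with
    | none => simp [hacc] at h
    | some acc =>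
      rw [hacc] at h
      simp only at h
      by_cases hlt : acc < 90
      · rw [if_pos hlt] at h
        obtain rfl : pvFmt ((pvLookup? m "name").getD "Unknown") acc = s := by
          simpa using h
        exact pvFmt_ne_empty _ _
      · rw [if_neg hlt] at h
        exact ih h

theorem smart_os_detection_spec : Claim_equal_smart_os_detection := by
  intro hi hdom hpre
  unfold Pre_smart_os_detection at hpre
  unfold Spec_smart_os_detection smart_os_detection smart_os_detection_alt
  obtain ⟨ls, hls⟩ := pvStrongB_some _ hpre
  obtain ⟨w, hw⟩ := pvWeakB_some _ hpre
  rw [foldA_eq (pvMatches hi) hpre [] none, hls, hw]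
  cases ls with
  | cons x xs => simp [pvFalsy, hls]
  | nil =>
    cases w with
    | none => simp [pvFalsy, hls, hw]
    | some s =>
      have hne := pvWeakB_nonempty _ _ hw
      simp [pvFalsy, hne, hls, hw, PySem.Str.join]
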